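-- pv_equiv track=rewrite | github.com/KITLoveWF/8-puzzle | GUI.py | save_empty
-- ===== SOURCE A (Python) =====
-- def save_empty(array,x,y,width,n):
--     l = x
--     k = 0
--     for i in range(len(array)):
--         for j in range(len(array[i])):
--             if array[i][j] == -1:
--                 return (x,y)
--             k = k + 1
--             x = x + width
--             if k%n == 0:
--                 y = y + width
--                 x = l
--                 k = 0
-- ===== SOURCE B (Python) =====
-- def save_empty(array, x, y, width, n):
--     # Flatten the grid in row-major order, locate the first -1, and compute
--     # its pixel coordinate in closed form from its flat index.
--     flat = [cell for row in array for cell in row]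
--     if -1 in flat:
--         q, r = divmod(flat.index(-1), n)
--         return (x + width * r, y + width * q)
-- ===== Notes on version B (the rewrite author's own statement) =====
-- stated objective: simpler
-- what changed: Instead of stepping a cursor (x, y, k) cell by cell with reset-at-wrap bookkeeping, B flattens the grid, finds the flat index of the first -1 and computes the coordinate in closed form by divmod; Pre_ restricts to the natural domain n >= 1 (n is the grid's column count): for n = 0 A raises ZeroDivisionError on the first scanned non-match (and its return before ever dividing when the very first cell is -1 is accidental), and for n < 0 A's wrap at multiples of |n| is an artefact of its cursor bookkeeping.
-- outside the precondition, e.g. on save_empty([[1, -1]], 0, 0, 5, -2): A returns (5, 0), B returns (-5, -5); on save_empty([[-1]], 0, 0, 5, 0): A returns (0, 0), B raises ZeroDivisionError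
import Mathlib
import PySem

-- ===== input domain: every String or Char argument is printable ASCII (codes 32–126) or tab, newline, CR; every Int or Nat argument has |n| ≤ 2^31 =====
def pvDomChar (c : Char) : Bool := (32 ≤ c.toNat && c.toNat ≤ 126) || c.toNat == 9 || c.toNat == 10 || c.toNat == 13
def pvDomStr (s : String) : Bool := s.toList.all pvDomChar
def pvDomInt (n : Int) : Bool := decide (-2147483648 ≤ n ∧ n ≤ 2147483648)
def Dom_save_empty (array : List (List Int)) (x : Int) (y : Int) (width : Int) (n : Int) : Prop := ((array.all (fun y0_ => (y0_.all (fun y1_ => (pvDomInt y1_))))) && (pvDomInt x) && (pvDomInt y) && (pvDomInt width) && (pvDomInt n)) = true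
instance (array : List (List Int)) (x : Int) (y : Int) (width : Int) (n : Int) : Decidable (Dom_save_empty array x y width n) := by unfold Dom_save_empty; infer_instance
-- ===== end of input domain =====

-- B replaces A's stepping cursor (x, y, k) with: locate the flat index of the
-- first -1 and compute the coordinate in closed form by divmod with n.

-- ===== PORT A =====
-- inner loop 'for j in range(len(array[i]))': early return via Sum.inl, updated state via Sum.inr
def save_empty_inner (l width n : Int) : List Int → Int → Int → Int → Sum (Int × Int) (Int × Int × Int)
  | [], x, y, k => Sum.inr (x, y, k)
  | c :: rest, x, y, k =>
    if c = -1 then Sum.inl (x, y)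
    else
      let k1 := k + 1
      let x1 := x + width
      if PySem.Int.mod k1 n = 0 then
        save_empty_inner l width n rest l (y + width) 0
      else
        save_empty_inner l width n rest x1 y k1

-- outer loop 'for i in range(len(array))'
def save_empty_outer (l width n : Int) : List (List Int) → Int → Int → Int → Option (Int × Int)
  | [], _, _, _ => none
  | row :: rows, x, y, k =>
    match save_empty_inner l width n row x y k with
    | Sum.inl p => some p
    | Sum.inr (x1, y1, k1) => save_empty_outer l width n rows x1 y1 k1

def save_empty (array : List (List Int)) (x : Int) (y : Int) (width : Int) (n : Int) : Option (Int × Int) :=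
  save_empty_outer x width n array x y 0

-- ===== PORT B =====
def save_empty_alt (array : List (List Int)) (x : Int) (y : Int) (width : Int) (n : Int) : Option (Int × Int) :=
  match PySem.List.index? (array.flatMap (fun row => row)) (-1) with
  | none => none
  | some c =>
    some (x + width * PySem.Int.mod (c : Int) n, y + width * PySem.Int.floordiv (c : Int) n)

-- ===== PRECONDITION & SPEC =====
-- Pre_ restricts to the natural domain n ≥ 1 (n is the grid's column count): for n = 0 A
-- raises ZeroDivisionError on the first scanned non-match (and its return before ever
-- dividing when the very first cell is -1 is accidental), and for n < 0 A's wrap at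
-- multiples of |n| is an artefact of its cursor bookkeeping.
def Pre_save_empty (array : List (List Int)) (x : Int) (y : Int) (width : Int) (n : Int) : Prop :=
  1 ≤ n
instance (array : List (List Int)) (x : Int) (y : Int) (width : Int) (n : Int) : Decidable (Pre_save_empty array x y width n) := by unfold Pre_save_empty; infer_instance
def pvWitness_save_empty : List (List Int) × Int × Int × Int × Int := ([[1, 2], [3, -1]], 10, 20, 5, 2)

def Spec_save_empty (array : List (List Int)) (x : Int) (y : Int) (width : Int) (n : Int) (out : Option (Int × Int)) : Prop := out = save_empty_alt array x y width n
instance (array : List (List Int)) (x : Int) (y : Int) (width : Int) (n : Int) (out : Option (Int × Int)) : Decidable (Spec_save_empty array x y width n out) := by unfold Spec_save_empty; infer_instance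

-- ===== CLAIM (what is proved, stated in full; the proofs are below) =====
def Claim_equal_save_empty : Prop := ∀ (array : List (List Int)) (x : Int) (y : Int) (width : Int) (n : Int), Dom_save_empty array x y width n → Pre_save_empty array x y width n → Spec_save_empty array x y width n (save_empty array x y width n)

-- ===== LEMMAS AND PROOFS =====

-- A's nested loops, fused over the flattened cell list (proof-side helper)
def goFlat (l width n : Int) : List Int → Int → Int → Int → Option (Int × Int)
  | [], _, _, _ => none
  | c :: rest, x, y, k =>
    if c = -1 then some (x, y)
    else
      let k1 := k + 1
      let x1 := x + width
      if PySem.Int.mod k1 n = 0 then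
        goFlat l width n rest l (y + width) 0
      else
        goFlat l width n rest x1 y k1

theorem inner_flat (l width n : Int) (row : List Int) (rest : List Int) (x y k : Int) :
    (match save_empty_inner l width n row x y k with
     | Sum.inl p => some p
     | Sum.inr (x1, y1, k1) => goFlat l width n rest x1 y1 k1)
    = goFlat l width n (row ++ rest) x y k := by
  induction row generalizing x y k with
  | nil => simp [save_empty_inner, goFlat]
  | cons c cs ih =>
    by_cases hc : c = -1
    · simp [save_empty_inner, goFlat, hc]
    · by_cases hm : PySem.Int.mod (k + 1) n = 0 <;>
        simp [save_empty_inner, goFlat, hc, hm, ih]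

theorem outer_flat (l width n : Int) (rows : List (List Int)) (x y k : Int) :
    save_empty_outer l width n rows x y k = goFlat l width n (rows.flatMap (fun row => row)) x y k := by
  induction rows generalizing x y k with
  | nil => simp [save_empty_outer, goFlat]
  | cons row rows ih =>
    have h := inner_flat l width n row (rows.flatMap (fun row => row)) x y k
    simp only [save_empty_outer, List.flatMap_cons]
    rw [← h]
    cases save_empty_inner l width n row x y k with
    | inl p => simp
    | inr s => obtain ⟨x1, y1, k1⟩ := s; simp [ih]

-- closed form of goFlat for n ≥ 1, under the loop invariant x = l + width * k, 0 ≤ k < n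
theorem goFlat_closed (l width n : Int) (hm : 0 < n) (cells : List Int) (y k : Int)
    (hk0 : 0 ≤ k) (hk1 : k < n) :
    goFlat l width n cells (l + width * k) y k
      = (PySem.List.index? cells (-1)).map
          (fun (c : Nat) => (l + width * (PySem.Int.mod (k + (c : Int)) n),
                     y + width * (PySem.Int.floordiv (k + (c : Int)) n))) := by
  induction cells generalizing y k with
  | nil => simp [goFlat, PySem.List.index?]
  | cons c cs ih =>
    by_cases hc : c = -1
    · subst hc
      rw [PySem.List.index?_cons_self]
      have h1 : PySem.Int.mod k n = k := by
        rw [PySem.Int.mod_eq_emod_of_pos hm]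
        exact Int.emod_eq_of_lt hk0 hk1
      have h2 : PySem.Int.floordiv k n = 0 := by
        rw [PySem.Int.floordiv_eq_ediv_of_pos hm]
        exact Int.ediv_eq_zero_of_lt hk0 hk1
      simp [goFlat, h1, h2]
    · rw [PySem.List.index?_cons_of_ne cs hc]
      simp only [goFlat, if_neg hc]
      have hdvd : PySem.Int.mod (k + 1) n = 0 ↔ (n : Int) ∣ (k + 1) :=
        PySem.Int.mod_eq_zero_iff_dvd _ _
      by_cases hw : PySem.Int.mod (k + 1) n = 0
      · -- wrap: k + 1 = n
        have hkn : k + 1 = n := by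
          have h1 : n ≤ k + 1 := Int.le_of_dvd (by omega) (hdvd.mp hw)
          omega
        rw [if_pos hw]
        have hrec := ih (y + width) 0 le_rfl hm
        simp only [Int.mul_zero, Int.add_zero, Int.zero_add] at hrec
        rw [hrec]
        cases hidx : PySem.List.index? cs (-1) with
        | none => simp
        | some c' =>
          simp only [Option.map_some, Option.map_some]
          have e1 : (k + ((c' + 1 : Nat) : Int)) = (c' : Int) + n := by
            push_cast; omega
          have m1 : PySem.Int.mod ((c':Int) + n) n = PySem.Int.mod (c':Int) n := by
            rw [PySem.Int.mod_eq_emod_of_pos hm, PySem.Int.mod_eq_emod_of_pos hm]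
            have h := Int.add_mul_emod_self_left (a := (c' : Int)) (b := n) (c := 1)
            simpa using h
          have d1 : PySem.Int.floordiv ((c':Int) + n) n = PySem.Int.floordiv (c':Int) n + 1 := by
            rw [PySem.Int.floordiv_eq_ediv_of_pos hm, PySem.Int.floordiv_eq_ediv_of_pos hm]
            have h := Int.add_mul_ediv_right (c' : Int) 1 (show (n : Int) ≠ 0 by omega)
            simpa using h
          simp only [e1, m1, d1, Option.some.injEq, Prod.mk.injEq]
          and_intros <;> first | trivial | ring
      · -- no wrap: k + 1 < n
        have hklt : k + 1 < n := by
          rcases lt_or_eq_of_le (by omega : k + 1 ≤ n) with h | h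
          · exact h
          · exact absurd (hdvd.mpr ⟨1, by omega⟩) hw
        rw [if_neg hw]
        have hx1 : l + width * k + width = l + width * (k + 1) := by ring
        rw [hx1]
        have hrec := ih y (k + 1) (by omega) hklt
        rw [hrec]
        cases hidx : PySem.List.index? cs (-1) with
        | none => simp
        | some c' =>
          simp only [Option.map_some]
          have e1 : (k + 1 + (c':Int)) = (k + ((c' + 1 : Nat) : Int)) := by push_cast; omega
          rw [e1]

-- ===== VERDICT (by name: the statement is the Claim_ definition above) =====
theorem save_empty_spec : Claim_equal_save_empty := by
  intro array x y width n _ hpre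
  unfold Spec_save_empty
  unfold save_empty
  rw [outer_flat]
  have hm : (0:Int) < n := hpre
  have h0 : goFlat x width n (array.flatMap (fun row => row)) x y 0
      = goFlat x width n (array.flatMap (fun row => row)) (x + width * 0) y 0 := by ring_nf
  rw [h0, goFlat_closed x width n hm _ y 0 le_rfl hm]
  unfold save_empty_alt
  cases hidx : PySem.List.index? (array.flatMap (fun row => row)) (-1) with
  | none => simp
  | some c => simp
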